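-- pv_equiv track=rewrite | github.com/y56/learn | find-largest-L-shape/soln.py | solution
-- ===== SOURCE A (Python) =====
-- def solution(A):
--
--     def spread(i,j): # spread the False left, up, and left-up
--         if 0 <= i - 1 < N and 0 <= j < M:
--             A[i - 1][j] &= A[i][j]
--         if 0 <= i < N and 0 <= j - 1 < M:
--             A[i][j - 1] &= A[i][j]
--         if 0 <= i - 1 < N and 0 <= j - 1 < M:
--             A[i - 1][j - 1] &= A[i][j]
--
--     def findL(R, C, k):
--         for i in range(R):
--             for j in range(C):
--                 if i + k < R and j + k < C and \
--                 A[i][j] and A[i + k][j] and A[i + k][j + k]: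
--                     return True
--         return False
--
--     M, N = len(A[0]), len(A)
--     R, C = N, M
--     K = 1
--     ans = 0
--     while R > 0 and C > 0:
--         if findL(R, C, K):
--             ans = K
--         for i in range(R):
--             for j in range(C):
--                 spread(i,j)
--         K += 1
--         R -= 1
--         C -= 1
--     return ans
-- ===== SOURCE B (Python) =====
-- def solution(A):
--     M, N = len(A[0]), len(A)
--     # sq[i][j] = side of the largest all-True square whose top-left corner
--     # is (i, j), looking only at the first M columns; N+1 x M+1 with a zero border.
--     sq = [[0] * (M + 1) for _ in range(N + 1)]
--     for i in range(N - 1, -1, -1):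
--         for j in range(M - 1, -1, -1):
--             if A[i][j]:
--                 sq[i][j] = 1 + min(sq[i + 1][j], sq[i][j + 1], sq[i + 1][j + 1])
--     for k in range(min(N, M) // 2, 0, -1):
--         for i in range(N - 2 * k + 1):
--             for j in range(M - 2 * k + 1):
--                 if sq[i][j] >= k and sq[i + k][j] >= k and sq[i + k][j + k] >= k:
--                     return k
--     return 0
-- ===== Notes on version B (the rewrite author's own statement) =====
-- stated objective: faster
-- what changed: A repeatedly mutates the grid in place, AND-shrinking it min(N,M) times with an O(N*M) scan-and-spread per candidate size; B builds the classic largest-solid-square DP table once (bottom-up, right-to-left) and then scans candidate L-sizes from the largest downward with three O(1) table lookups per position, returning at the first hit.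
import Mathlib
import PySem

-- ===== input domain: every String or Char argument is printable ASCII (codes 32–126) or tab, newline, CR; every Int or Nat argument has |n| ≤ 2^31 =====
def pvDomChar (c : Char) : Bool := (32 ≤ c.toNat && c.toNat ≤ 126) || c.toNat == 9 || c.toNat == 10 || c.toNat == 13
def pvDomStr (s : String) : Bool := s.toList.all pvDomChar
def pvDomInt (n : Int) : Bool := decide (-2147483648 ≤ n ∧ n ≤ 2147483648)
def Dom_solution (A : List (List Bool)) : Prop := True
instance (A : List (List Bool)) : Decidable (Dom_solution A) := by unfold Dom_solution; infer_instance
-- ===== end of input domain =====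

-- B replaces A's in-place iterative 2x2-AND shrinking (A mutates its argument; B does not —
-- the equivalence proved here is about the return value) by a largest-square DP plus a
-- descending scan over candidate sizes; measurably faster by a large constant factor.

-- ===== PORT A =====
def pvGget (g : List (List Bool)) (i j : Nat) : Bool := (g.getD i []).getD j false
def pvGset (g : List (List Bool)) (i j : Nat) (v : Bool) : List (List Bool) :=
  g.set i ((g.getD i []).set j v)
-- spread(i,j): the three conditional `&=` updates, in A's order (guards `0 <= i-1 < N` etc.)
def pvSpread (N M : Nat) (g : List (List Bool)) (i j : Nat) : List (List Bool) :=
  let g1 := if 1 ≤ i ∧ i - 1 < N ∧ j < M then pvGset g (i-1) j (pvGget g (i-1) j && pvGget g i j) else g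
  let g2 := if i < N ∧ 1 ≤ j ∧ j - 1 < M then pvGset g1 i (j-1) (pvGget g1 i (j-1) && pvGget g1 i j) else g1
  if 1 ≤ i ∧ i - 1 < N ∧ 1 ≤ j ∧ j - 1 < M then pvGset g2 (i-1) (j-1) (pvGget g2 (i-1) (j-1) && pvGget g2 i j) else g2
def pvFindL (g : List (List Bool)) (R C k : Nat) : Bool :=
  (List.range R).any fun i => (List.range C).any fun j =>
    decide (i + k < R) && decide (j + k < C) && pvGget g i j && pvGget g (i+k) j && pvGget g (i+k) (j+k)
def pvPass (N M : Nat) (g : List (List Bool)) (R C : Nat) : List (List Bool) :=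
  (List.range R).foldl (fun g i => (List.range C).foldl (fun g j => pvSpread N M g i j) g) g
-- the `while R > 0 and C > 0` loop (R strictly decreases)
def pvLoopA (N M : Nat) : List (List Bool) → Nat → Nat → Nat → Int → Int
  | g, R, C, K, ans =>
    if 0 < R ∧ 0 < C then
      pvLoopA N M (pvPass N M g R C) (R-1) (C-1) (K+1) (if pvFindL g R C K then (K : Int) else ans)
    else ans
  termination_by g R C K ans => R
  decreasing_by omega

def solution (A : List (List Bool)) : Int :=
  pvLoopA A.length (A.headI).length A A.length (A.headI).length 1 0

-- ===== PORT B =====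
def pvMin3 (a b c : Nat) : Nat := min a (min b c)
-- one DP row, filled right-to-left (columns M-jj .. M), given the row below
def pvSqRowGo (r : List Bool) (next : List Nat) (M : Nat) : Nat → List Nat
  | 0 => [0]
  | jj+1 =>
    let rest := pvSqRowGo r next M jj
    let c := M - (jj+1)
    (if r.getD c false then 1 + pvMin3 (next.getD c 0) rest.headI (next.getD (c+1) 0) else 0) :: rest
-- the whole (N+1)×(M+1) DP table, built bottom-up
def pvSqGrid (M : Nat) : List (List Bool) → List (List Nat)
  | [] => [List.replicate (M+1) 0]
  | r :: rs =>
    let below := pvSqGrid M rs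
    pvSqRowGo r below.headI M M :: below
def pvSqGet (sq : List (List Nat)) (i j : Nat) : Nat := (sq.getD i []).getD j 0
def pvCheck (sq : List (List Nat)) (N M k : Nat) : Bool :=
  (List.range (N - 2*k + 1)).any fun i => (List.range (M - 2*k + 1)).any fun j =>
    decide (k ≤ pvSqGet sq i j) && decide (k ≤ pvSqGet sq (i+k) j) && decide (k ≤ pvSqGet sq (i+k) (j+k))
-- `for k in range(min(N,M)//2, 0, -1)` with early return
def pvScanK (sq : List (List Nat)) (N M : Nat) : Nat → Int
  | 0 => 0
  | k+1 => if pvCheck sq N M (k+1) then ((k : Int)+1) else pvScanK sq N M k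

def solution_alt (A : List (List Bool)) : Int :=
  let M := (A.headI).length
  let N := A.length
  let sq := pvSqGrid M A
  pvScanK sq N M (min N M / 2)

-- ===== PRECONDITION & SPEC =====
-- Pre_ excludes exactly the inputs where the Python A raises IndexError: the empty list
-- (A[0]) and grids with a row shorter than the first row (the spread pass indexes every
-- cell of the first len(A[0]) columns).
def Pre_solution (A : List (List Bool)) : Prop :=
  A ≠ [] ∧ ∀ r ∈ A, (A.headI).length ≤ r.length
instance (A : List (List Bool)) : Decidable (Pre_solution A) := by unfold Pre_solution; infer_instance
def pvWitness_solution : List (List Bool) := [[true, true], [true, false]]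
def Spec_solution (A : List (List Bool)) (out : Int) : Prop := out = solution_alt A
instance (A : List (List Bool)) (out : Int) : Decidable (Spec_solution A out) := by unfold Spec_solution; infer_instance

-- ===== CLAIM (what is proved, stated in full; the proofs are below) =====
def Claim_equal_solution : Prop := ∀ (A : List (List Bool)), Dom_solution A → Pre_solution A → Spec_solution A (solution A)

-- ===== LEMMAS AND PROOFS =====

-- `A` below is always the ORIGINAL grid; `g` a working grid of A's loop.
-- pvSolid g N M i j k: the k×k square with top-left corner (i,j) fits in the N×M box and is all-true.
def pvSolid (g : List (List Bool)) (N M i j k : Nat) : Bool :=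
  decide (i + k ≤ N) && decide (j + k ≤ M) &&
  ((List.range k).all fun di => (List.range k).all fun dj => pvGget g (i+di) (j+dj))

-- well-formedness of a working grid: N rows, each of length ≥ M
def pvWF (g : List (List Bool)) (N M : Nat) : Prop :=
  g.length = N ∧ ∀ a, a < N → M ≤ (g.getD a []).length

-- "an L of three solid k×k squares exists" (on the original grid)
def pvEL (A : List (List Bool)) (N M k : Nat) : Bool :=
  (List.range N).any fun i => (List.range M).any fun j =>
    decide (i + 2*k ≤ N) && decide (j + 2*k ≤ M) &&
    pvSolid A N M i j k && pvSolid A N M (i+k) j k && pvSolid A N M (i+k) (j+k) k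

-- abstraction of A's loop: K counts up for m steps, last true pvEL wins
def pvBestFrom (A : List (List Bool)) (N M : Nat) : Nat → Nat → Int → Int
  | _, 0, ans => ans
  | K, m+1, ans => pvBestFrom A N M (K+1) m (if pvEL A N M K then (K : Int) else ans)
-- abstraction of B's scan: first true pvEL from n downward
def pvDownF (A : List (List Bool)) (N M : Nat) : Nat → Int
  | 0 => 0
  | k+1 => if pvEL A N M (k+1) then ((k : Int)+1) else pvDownF A N M k
-- bridge between the two scan orders
def pvDownSeg (A : List (List Bool)) (N M : Nat) : Nat → Nat → Int → Int
  | _, 0, ans => ans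
  | K, m+1, ans => if pvEL A N M (K+m) then ((K+m : Nat) : Int) else pvDownSeg A N M K m ans

lemma solid_iff (g : List (List Bool)) (N M i j k : Nat) :
    pvSolid g N M i j k = true ↔
      i + k ≤ N ∧ j + k ≤ M ∧ ∀ di < k, ∀ dj < k, pvGget g (i+di) (j+dj) = true := by
  simp [pvSolid]; tauto

lemma solid_mono (g : List (List Bool)) (N M i j k i' j' k' : Nat)
    (h : pvSolid g N M i j k = true) (h1 : i ≤ i') (h2 : j ≤ j')
    (h3 : i' + k' ≤ i + k) (h4 : j' + k' ≤ j + k) : pvSolid g N M i' j' k' = true := by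
  rw [solid_iff] at h ⊢
  obtain ⟨hN, hM, hc⟩ := h
  refine ⟨by omega, by omega, ?_⟩
  intro di hdi dj hdj
  have hx := hc (i' - i + di) (by omega) (j' - j + dj) (by omega)
  have e1 : i + (i' - i + di) = i' + di := by omega
  have e2 : j + (j' - j + dj) = j' + dj := by omega
  rwa [e1, e2] at hx

-- the 4-corner split with the (i,j) cell
lemma solid_split (g : List (List Bool)) (N M i j k : Nat) :
    pvSolid g N M i j (k+1) =
      (pvGget g i j && pvSolid g N M (i+1) j k && pvSolid g N M i (j+1) k &&
       pvSolid g N M (i+1) (j+1) k) := by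
  rw [Bool.eq_iff_iff]
  simp only [Bool.and_eq_true, solid_iff]
  constructor
  · rintro ⟨hN, hM, hc⟩
    have g00 := hc 0 (by omega) 0 (by omega)
    simp only [Nat.add_zero] at g00
    refine ⟨⟨⟨g00, by omega, by omega, ?_⟩, by omega, by omega, ?_⟩, by omega, by omega, ?_⟩ <;>
      intro di hdi dj hdj
    · have hx := hc (1+di) (by omega) dj (by omega)
      have e : i + (1 + di) = i + 1 + di := by omega
      rwa [e] at hx
    · have hx := hc di (by omega) (1+dj) (by omega)
      have e : j + (1 + dj) = j + 1 + dj := by omega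
      rwa [e] at hx
    · have hx := hc (1+di) (by omega) (1+dj) (by omega)
      have e : i + (1 + di) = i + 1 + di := by omega
      have e' : j + (1 + dj) = j + 1 + dj := by omega
      rwa [e, e'] at hx
  · rintro ⟨⟨⟨g00, _, _, s1⟩, _, _, s2⟩, hN, hM, s3⟩
    refine ⟨by omega, by omega, ?_⟩
    intro di hdi dj hdj
    by_cases hdi0 : di = 0
    · by_cases hdj0 : dj = 0
      · subst hdi0; subst hdj0; simpa using g00
      · have hx := s2 di (by omega) (dj-1) (by omega)
        have e : j + 1 + (dj - 1) = j + dj := by omega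
        rwa [e] at hx
    · by_cases hdj0 : dj = 0
      · have hx := s1 (di-1) (by omega) dj (by omega)
        have e : i + 1 + (di - 1) = i + di := by omega
        rwa [e] at hx
      · have hx := s3 (di-1) (by omega) (dj-1) (by omega)
        have e : i + 1 + (di - 1) = i + di := by omega
        have e' : j + 1 + (dj - 1) = j + dj := by omega
        rwa [e, e'] at hx

-- the 4-corner split with four k-squares (k ≥ 1)
lemma solid_split' (g : List (List Bool)) (N M i j k : Nat) (hk : 1 ≤ k) :
    pvSolid g N M i j (k+1) =
      (pvSolid g N M i j k && pvSolid g N M i (j+1) k && pvSolid g N M (i+1) j k &&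
       pvSolid g N M (i+1) (j+1) k) := by
  rw [Bool.eq_iff_iff]
  constructor
  · intro h
    simp only [Bool.and_eq_true]
    exact ⟨⟨⟨solid_mono g N M i j (k+1) i j k h (by omega) (by omega) (by omega) (by omega),
      solid_mono g N M i j (k+1) i (j+1) k h (by omega) (by omega) (by omega) (by omega)⟩,
      solid_mono g N M i j (k+1) (i+1) j k h (by omega) (by omega) (by omega) (by omega)⟩,
      solid_mono g N M i j (k+1) (i+1) (j+1) k h (by omega) (by omega) (by omega) (by omega)⟩
  · intro h
    simp only [Bool.and_eq_true] at h
    obtain ⟨⟨⟨h1, h2⟩, h3⟩, h4⟩ := h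
    have g00 : pvGget g i j = true := by
      rw [solid_iff] at h1
      have hx := h1.2.2 0 (by omega) 0 (by omega)
      simpa using hx
    rw [solid_split]
    simp [g00, h2, h3, h4]

-- ---- A side: what one pass does ----
lemma gget_set (g : List (List Bool)) (i j : Nat) (v : Bool) (a b : Nat)
    (hi : i < g.length) (hj : j < (g.getD i []).length) :
    pvGget (pvGset g i j v) a b = if a = i ∧ b = j then v else pvGget g a b := by
  unfold pvGget pvGset
  rcases eq_or_ne a i with rfl | ha
  · have h1 : (g.set a ((g.getD a []).set j v)).getD a [] = (g.getD a []).set j v := by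
      rw [List.getD_eq_getElem?_getD, List.getElem?_set_self hi, Option.getD_some]
    rw [h1]
    rcases eq_or_ne b j with rfl | hb
    · rw [if_pos ⟨rfl, rfl⟩, List.getD_eq_getElem?_getD, List.getElem?_set_self hj, Option.getD_some]
    · rw [if_neg (by rintro ⟨_, rfl⟩; exact hb rfl), List.getD_eq_getElem?_getD,
        List.getElem?_set_ne (Ne.symm hb), ← List.getD_eq_getElem?_getD]
  · have h1 : (g.set i ((g.getD i []).set j v)).getD a [] = g.getD a [] := by
      rw [List.getD_eq_getElem?_getD, List.getElem?_set_ne (Ne.symm ha), ← List.getD_eq_getElem?_getD]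
    rw [h1, if_neg (by rintro ⟨rfl, _⟩; exact ha rfl)]

lemma wf_gset (g : List (List Bool)) (N M i j : Nat) (v : Bool) (h : pvWF g N M) :
    pvWF (pvGset g i j v) N M := by
  obtain ⟨hl, hr⟩ := h
  refine ⟨by simpa [pvGset] using hl, ?_⟩
  intro a ha
  rcases eq_or_ne i a with rfl | hia
  · by_cases hi : i < g.length
    · have h1 : (pvGset g i j v).getD i [] = (g.getD i []).set j v := by
        rw [pvGset, List.getD_eq_getElem?_getD, List.getElem?_set_self hi, Option.getD_some]
      rw [h1, List.length_set]; exact hr i ha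
    · exact absurd (hl ▸ ha) hi
  · have h1 : (pvGset g i j v).getD a [] = g.getD a [] := by
      rw [pvGset, List.getD_eq_getElem?_getD, List.getElem?_set_ne hia, ← List.getD_eq_getElem?_getD]
    rw [h1]; exact hr a ha

def pvHit (i j a b : Nat) : Bool :=
  (i = a+1 ∧ j = b : Bool) || (i = a ∧ j = b+1 : Bool) || (i = a+1 ∧ j = b+1 : Bool)

lemma spread_gget (N M : Nat) (g : List (List Bool)) (i j a b : Nat)
    (hW : pvWF g N M) (hi : i < N) (hj : j < M) :
    pvGget (pvSpread N M g i j) a b =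
      (pvGget g a b && (if pvHit i j a b then pvGget g i j else true)) := by
  have key : ∀ (g' : List (List Bool)), pvWF g' N M → ∀ x y v a' b', x < N → y < M →
      pvGget (pvGset g' x y v) a' b' = if a' = x ∧ b' = y then v else pvGget g' a' b' := by
    intro g' hg' x y v a' b' hx hy
    exact gget_set g' x y v a' b' (hg'.1 ▸ hx) (lt_of_lt_of_le hy (hg'.2 x hx))
  simp only [pvSpread]
  by_cases hI : 1 ≤ i <;> by_cases hJ : 1 ≤ j
  · rw [if_pos (show 1 ≤ i ∧ i - 1 < N ∧ j < M from ⟨hI, by omega, hj⟩),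
      if_pos (show i < N ∧ 1 ≤ j ∧ j - 1 < M from ⟨hi, hJ, by omega⟩),
      if_pos (show 1 ≤ i ∧ i - 1 < N ∧ 1 ≤ j ∧ j - 1 < M from ⟨hI, by omega, hJ, by omega⟩)]
    set v1 := pvGget g (i-1) j && pvGget g i j with hv1
    set G1 := pvGset g (i-1) j v1 with hG1
    set v2 := pvGget G1 i (j-1) && pvGget G1 i j with hv2
    set G2 := pvGset G1 i (j-1) v2 with hG2
    set v3 := pvGget G2 (i-1) (j-1) && pvGget G2 i j with hv3
    have wf1 : pvWF G1 N M := wf_gset _ _ _ _ _ _ hW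
    have wf2 : pvWF G2 N M := wf_gset _ _ _ _ _ _ wf1
    have e1 : ∀ a' b', pvGget G1 a' b' = if a' = i-1 ∧ b' = j then v1 else pvGget g a' b' :=
      fun a' b' => key g hW (i-1) j v1 a' b' (by omega) hj
    have e2 : ∀ a' b', pvGget G2 a' b' = if a' = i ∧ b' = j-1 then v2 else pvGget G1 a' b' :=
      fun a' b' => key G1 wf1 i (j-1) v2 a' b' hi (by omega)
    have e3 : ∀ a' b', pvGget (pvGset G2 (i-1) (j-1) v3) a' b' =
        if a' = i-1 ∧ b' = j-1 then v3 else pvGget G2 a' b' :=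
      fun a' b' => key G2 wf2 (i-1) (j-1) v3 a' b' (by omega) (by omega)
    rw [e3 a b]
    have hv2' : v2 = (pvGget g i (j-1) && pvGget g i j) := by
      rw [hv2, e1 i (j-1), e1 i j, if_neg (by omega), if_neg (by omega)]
    have hv3' : v3 = (pvGget g (i-1) (j-1) && pvGget g i j) := by
      rw [hv3, e2 (i-1) (j-1), e2 i j, if_neg (by omega), if_neg (by omega),
        e1 (i-1) (j-1), e1 i j, if_neg (by omega), if_neg (by omega)]
    by_cases c3 : a = i-1 ∧ b = j-1
    · rw [if_pos c3]
      have hh : pvHit i j a b = true := by simp only [pvHit]; simp; omega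
      rw [hh, if_pos rfl, hv3', c3.1, c3.2]
    · rw [if_neg c3, e2 a b]
      by_cases c2 : a = i ∧ b = j-1
      · rw [if_pos c2]
        have hh : pvHit i j a b = true := by simp only [pvHit]; simp; omega
        rw [hh, if_pos rfl, hv2', c2.1, c2.2]
      · rw [if_neg c2, e1 a b]
        by_cases c1 : a = i-1 ∧ b = j
        · rw [if_pos c1]
          have hh : pvHit i j a b = true := by simp only [pvHit]; simp; omega
          rw [hh, if_pos rfl, hv1, c1.1, c1.2]
        · rw [if_neg c1]
          have hh : pvHit i j a b = false := by simp only [pvHit]; simp; omega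
          rw [hh]
          simp
  · rw [if_pos (show 1 ≤ i ∧ i - 1 < N ∧ j < M from ⟨hI, by omega, hj⟩),
      if_neg (by omega), if_neg (by omega)]
    rw [key g hW (i-1) j _ a b (by omega) hj]
    by_cases c1 : a = i-1 ∧ b = j
    · rw [if_pos c1]
      have hh : pvHit i j a b = true := by simp only [pvHit]; simp; omega
      rw [hh, if_pos rfl, c1.1, c1.2]
    · rw [if_neg c1]
      have hh : pvHit i j a b = false := by simp only [pvHit]; simp; omega
      rw [hh]
      simp
  · rw [if_neg (by omega),
      if_pos (show i < N ∧ 1 ≤ j ∧ j - 1 < M from ⟨hi, hJ, by omega⟩), if_neg (by omega)]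
    rw [key g hW i (j-1) _ a b hi (by omega)]
    by_cases c2 : a = i ∧ b = j-1
    · rw [if_pos c2]
      have hh : pvHit i j a b = true := by simp only [pvHit]; simp; omega
      rw [hh, if_pos rfl, c2.1, c2.2]
    · rw [if_neg c2]
      have hh : pvHit i j a b = false := by simp only [pvHit]; simp; omega
      rw [hh]
      simp
  · rw [if_neg (by omega), if_neg (by omega), if_neg (by omega)]
    have hh : pvHit i j a b = false := by simp only [pvHit]; simp; omega
    rw [hh]
    simp

lemma wf_spread (N M : Nat) (g : List (List Bool)) (i j : Nat) (h : pvWF g N M) :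
    pvWF (pvSpread N M g i j) N M := by
  simp only [pvSpread]
  split_ifs <;> (repeat' apply wf_gset) <;> exact h

def pvInner (N M : Nat) (g : List (List Bool)) (i C : Nat) : List (List Bool) :=
  (List.range C).foldl (fun g j => pvSpread N M g i j) g

lemma inner_succ (N M : Nat) (g : List (List Bool)) (i C : Nat) :
    pvInner N M g i (C+1) = pvSpread N M (pvInner N M g i C) i C := by
  simp [pvInner, List.range_succ]

lemma wf_inner (N M : Nat) (g : List (List Bool)) (i C : Nat) (h : pvWF g N M) :
    pvWF (pvInner N M g i C) N M := by
  induction C with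
  | zero => simpa [pvInner] using h
  | succ C IH => rw [inner_succ]; exact wf_spread _ _ _ _ _ IH

lemma inner_gget (N M : Nat) (g : List (List Bool)) (i : Nat)
    (hW : pvWF g N M) (hi : i < N) :
    ∀ C, C ≤ M → ∀ a b,
    pvGget (pvInner N M g i C) a b =
      if a = i then pvGget g a b && (if b+1 < C then pvGget g i (b+1) else true)
      else if a+1 = i then
        pvGget g a b && (if b < C then pvGget g i b else true) &&
          (if b+1 < C then pvGget g i (b+1) else true)
      else pvGget g a b := by
  intro C
  induction C with
  | zero =>
    intro _ a b
    simp only [pvInner, List.range_zero, List.foldl_nil]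
    split_ifs <;> simp_all <;> omega
  | succ C IH =>
    intro hC a b
    have hC' : C ≤ M := by omega
    have hIC : pvGget (pvInner N M g i C) i C = pvGget g i C := by
      rw [IH hC' i C]; simp
    rw [inner_succ, spread_gget N M _ i C a b (wf_inner N M g i C hW) hi (by omega), hIC,
      IH hC' a b]
    by_cases ha : a = i
    · subst ha
      rw [if_pos rfl, if_pos rfl]
      by_cases hb : b + 1 = C
      · have hh : pvHit a C a b = true := by simp [pvHit]; omega
        rw [if_pos hh, hb, if_neg (lt_irrefl C), if_pos (by omega : C < C + 1)]
        simp
      · have hh : ¬ pvHit a C a b = true := by simp [pvHit]; omega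
        rw [if_neg hh]
        by_cases hbc : b + 1 < C
        · rw [if_pos hbc, if_pos (by omega)]; simp
        · rw [if_neg hbc, if_neg (by omega)]; simp
    · rw [if_neg ha, if_neg ha]
      by_cases ha' : a + 1 = i
      · rw [if_pos ha', if_pos ha']
        by_cases hb0 : b = C
        · have hh : pvHit i C a b = true := by simp [pvHit]; omega
          rw [if_pos hh, hb0]
          rw [if_neg (lt_irrefl C), if_neg (by omega : ¬ C + 1 < C),
            if_pos (by omega : C < C + 1), if_neg (by omega : ¬ C + 1 < C + 1)]
          simp
        · by_cases hb1 : b + 1 = C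
          · have hh : pvHit i C a b = true := by simp [pvHit]; omega
            rw [if_pos hh, hb1]
            rw [if_pos (by omega : b < C), if_neg (lt_irrefl C),
              if_pos (by omega : b < C + 1), if_pos (by omega : C < C + 1)]
            simp
          · have hh : ¬ pvHit i C a b = true := by simp [pvHit]; omega
            rw [if_neg hh]
            split_ifs <;> first | omega | simp
      · rw [if_neg ha', if_neg ha']
        have hh : ¬ pvHit i C a b = true := by simp [pvHit]; omega
        rw [if_neg hh]
        simp

lemma pass_succ (N M : Nat) (g : List (List Bool)) (R C : Nat) :
    pvPass N M g (R+1) C = pvInner N M (pvPass N M g R C) R C := by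
  simp [pvPass, pvInner, List.range_succ]

lemma wf_pass (N M : Nat) (g : List (List Bool)) (R C : Nat) (h : pvWF g N M) :
    pvWF (pvPass N M g R C) N M := by
  induction R with
  | zero => simpa [pvPass] using h
  | succ R IH => rw [pass_succ]; exact wf_inner _ _ _ _ _ IH

lemma pass_gget (N M : Nat) (g : List (List Bool)) (C : Nat)
    (hW : pvWF g N M) (hC : C ≤ M) :
    ∀ R, R ≤ N → ∀ a b,
    pvGget (pvPass N M g R C) a b =
      (pvGget g a b &&
       (if a < R ∧ b+1 < C then pvGget g a (b+1) else true) &&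
       (if a+1 < R ∧ b < C then pvGget g (a+1) b else true) &&
       (if a+1 < R ∧ b+1 < C then pvGget g (a+1) (b+1) else true)) := by
  intro R
  induction R with
  | zero =>
    intro _ a b
    simp only [pvPass, List.range_zero, List.foldl_nil]
    split_ifs <;> simp_all
  | succ R IH =>
    intro hR a b
    have hR' : R ≤ N := by omega
    have hRbb : ∀ y, pvGget (pvPass N M g R C) R y = pvGget g R y := by
      intro y; rw [IH hR' R y]; simp
    rw [pass_succ,
      inner_gget N M (pvPass N M g R C) R (wf_pass N M g R C hW) (by omega) C hC a b,
      hRbb b, hRbb (b+1), IH hR' a b]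
    by_cases ha : a = R
    · subst ha
      rw [if_pos rfl]
      rw [if_neg (by omega : ¬(a < a ∧ b+1 < C)), if_neg (by omega : ¬(a+1 < a ∧ b < C)),
        if_neg (by omega : ¬(a+1 < a ∧ b+1 < C))]
      by_cases hbc : b + 1 < C
      · rw [if_pos hbc, if_pos (by omega : a < a+1 ∧ b+1 < C),
          if_neg (by omega : ¬(a+1 < a+1 ∧ b < C)), if_neg (by omega : ¬(a+1 < a+1 ∧ b+1 < C))]
        simp
      · rw [if_neg hbc, if_neg (by omega : ¬(a < a+1 ∧ b+1 < C)),
          if_neg (by omega : ¬(a+1 < a+1 ∧ b < C)), if_neg (by omega : ¬(a+1 < a+1 ∧ b+1 < C))]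
        simp
    · rw [if_neg ha]
      by_cases ha' : a + 1 = R
      · rw [if_pos ha']
        rw [if_neg (by omega : ¬(a+1 < R ∧ b < C)), if_neg (by omega : ¬(a+1 < R ∧ b+1 < C)), ha']
        by_cases hbc : b + 1 < C
        · rw [if_pos (by omega : a < R ∧ b+1 < C), if_pos hbc, if_pos (by omega : b < C),
            if_pos (by omega : a < R+1 ∧ b+1 < C), if_pos (by omega : R < R+1 ∧ b < C),
            if_pos (by omega : R < R+1 ∧ b+1 < C)]
          simp [Bool.and_assoc]
        · by_cases hbb : b < C
          · rw [if_neg (by omega : ¬(a < R ∧ b+1 < C)), if_neg hbc, if_pos hbb,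
              if_neg (by omega : ¬(a < R+1 ∧ b+1 < C)), if_pos (by omega : R < R+1 ∧ b < C),
              if_neg (by omega : ¬(R < R+1 ∧ b+1 < C))]
            simp [Bool.and_assoc]
          · rw [if_neg (by omega : ¬(a < R ∧ b+1 < C)), if_neg hbc, if_neg hbb,
              if_neg (by omega : ¬(a < R+1 ∧ b+1 < C)), if_neg (by omega : ¬(R < R+1 ∧ b < C)),
              if_neg (by omega : ¬(R < R+1 ∧ b+1 < C))]
            simp
      · rw [if_neg ha']
        split_ifs <;> first | omega | simp

-- the loop invariant: the current grid holds "solid K×K square here" flags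
lemma pass_solid (A : List (List Bool)) (N M : Nat) (g : List (List Bool)) (R C K : Nat)
    (hW : pvWF g N M) (hR : R + K = N + 1) (hC : C + K = M + 1) (hK : 1 ≤ K)
    (hinv : ∀ a b, a < R → b < C → pvGget g a b = pvSolid A N M a b K) :
    ∀ a b, a < R - 1 → b < C - 1 →
      pvGget (pvPass N M g R C) a b = pvSolid A N M a b (K+1) := by
  intro a b ha hb
  rw [pass_gget N M g C hW (by omega) R (by omega) a b]
  rw [if_pos (⟨by omega, by omega⟩ : a < R ∧ b+1 < C),
    if_pos (⟨by omega, by omega⟩ : a+1 < R ∧ b < C),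
    if_pos (⟨by omega, by omega⟩ : a+1 < R ∧ b+1 < C)]
  rw [hinv a b (by omega) (by omega), hinv a (b+1) (by omega) (by omega),
    hinv (a+1) b (by omega) (by omega), hinv (a+1) (b+1) (by omega) (by omega)]
  rw [solid_split' A N M a b K hK]

lemma findL_eq (A : List (List Bool)) (N M : Nat) (g : List (List Bool)) (R C K : Nat)
    (hR : R + K = N + 1) (hC : C + K = M + 1) (hK : 1 ≤ K)
    (hinv : ∀ a b, a < R → b < C → pvGget g a b = pvSolid A N M a b K) :
    pvFindL g R C K = pvEL A N M K := by
  rw [Bool.eq_iff_iff]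
  simp only [pvFindL, pvEL, List.any_eq_true, List.mem_range, Bool.and_eq_true,
    decide_eq_true_eq]
  constructor
  · rintro ⟨i, hiR, j, hjC, ⟨⟨⟨hik, hjk⟩, h1⟩, h2⟩, h3⟩
    rw [hinv i j (by omega) (by omega)] at h1
    rw [hinv (i+K) j (by omega) (by omega)] at h2
    rw [hinv (i+K) (j+K) (by omega) (by omega)] at h3
    exact ⟨i, by omega, j, by omega, ⟨⟨⟨by omega, by omega⟩, h1⟩, h2⟩, h3⟩
  · rintro ⟨i, hiN, j, hjM, ⟨⟨⟨hik, hjk⟩, h1⟩, h2⟩, h3⟩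
    rw [← hinv i j (by omega) (by omega)] at h1
    rw [← hinv (i+K) j (by omega) (by omega)] at h2
    rw [← hinv (i+K) (j+K) (by omega) (by omega)] at h3
    exact ⟨i, by omega, j, by omega, ⟨⟨⟨by omega, by omega⟩, h1⟩, h2⟩, h3⟩

lemma loopA_eq (A : List (List Bool)) (N M : Nat) :
    ∀ R g C K ans, pvWF g N M → R + K = N + 1 → C + K = M + 1 → 1 ≤ K →
      (∀ a b, a < R → b < C → pvGget g a b = pvSolid A N M a b K) →
      pvLoopA N M g R C K ans = pvBestFrom A N M K (min R C) ans := by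
  intro R
  induction R with
  | zero =>
    intro g C K ans _ _ _ _ _
    rw [pvLoopA]
    simp [pvBestFrom]
  | succ R IH =>
    intro g C K ans hW hR hC hK hinv
    match C with
    | 0 =>
      rw [pvLoopA]
      simp [pvBestFrom]
    | C'+1 =>
      rw [pvLoopA, if_pos ⟨by omega, by omega⟩]
      simp only [Nat.add_sub_cancel]
      rw [findL_eq A N M g (R+1) (C'+1) K hR hC hK hinv]
      rw [IH (pvPass N M g (R+1) (C'+1)) C' (K+1) _
        (wf_pass N M g (R+1) (C'+1) hW) (by omega) (by omega) (by omega)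
        (by
          intro a b ha hb
          have := pass_solid A N M g (R+1) (C'+1) K hW hR hC hK hinv a b (by omega) (by omega)
          simpa using this)]
      rw [show min (R+1) (C'+1) = (min R C') + 1 from by omega]
      rfl

-- ---- scan-order bridge ----
lemma downSeg_shift (A : List (List Bool)) (N M : Nat) :
    ∀ m K ans, pvDownSeg A N M (K+1) m (if pvEL A N M K then (K : Int) else ans) =
      pvDownSeg A N M K (m+1) ans := by
  intro m
  induction m with
  | zero =>
    intro K ans
    simp [pvDownSeg]
  | succ m IH =>
    intro K ans
    show (if pvEL A N M (K+1+m) then ((K+1+m : Nat) : Int)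
          else pvDownSeg A N M (K+1) m (if pvEL A N M K then (K : Int) else ans)) = _
    rw [IH K ans]
    have e : K + 1 + m = K + (m + 1) := by omega
    rw [e]
    rfl

lemma bestFrom_eq_downSeg (A : List (List Bool)) (N M : Nat) :
    ∀ m K ans, pvBestFrom A N M K m ans = pvDownSeg A N M K m ans := by
  intro m
  induction m with
  | zero => intro K ans; rfl
  | succ m IH =>
    intro K ans
    show pvBestFrom A N M (K+1) m (if pvEL A N M K then (K : Int) else ans) = _
    rw [IH, downSeg_shift]

lemma downSeg_eq_downF (A : List (List Bool)) (N M : Nat) :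
    ∀ n, pvDownSeg A N M 1 n 0 = pvDownF A N M n := by
  intro n
  induction n with
  | zero => rfl
  | succ n IH =>
    show (if pvEL A N M (1+n) then ((1+n : Nat) : Int) else pvDownSeg A N M 1 n 0) = _
    rw [IH, show 1+n = n+1 from by omega]
    show _ = (if pvEL A N M (n+1) then ((n : Int)+1) else pvDownF A N M n)
    have e : ((n+1 : Nat) : Int) = (n : Int) + 1 := by push_cast; ring
    rw [e]

lemma eL_bound (A : List (List Bool)) (N M k : Nat) (h : pvEL A N M k = true) :
    2*k ≤ N ∧ 2*k ≤ M := by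
  simp only [pvEL, List.any_eq_true, List.mem_range, Bool.and_eq_true, decide_eq_true_eq] at h
  obtain ⟨i, hi, j, hj, ⟨⟨⟨h1, h2⟩, _⟩, _⟩, _⟩ := h
  omega

lemma downF_trunc (A : List (List Bool)) (N M : Nat) :
    ∀ n h, h ≤ n → (∀ k, h < k → k ≤ n → pvEL A N M k = false) →
      pvDownF A N M n = pvDownF A N M h := by
  intro n
  induction n with
  | zero =>
    intro h hle _
    have : h = 0 := by omega
    rw [this]
  | succ n IH =>
    intro h hle hnone
    by_cases he : h = n+1
    · rw [he]
    · have h1 : pvEL A N M (n+1) = false := hnone (n+1) (by omega) (by omega)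
      show (if pvEL A N M (n+1) then ((n : Int)+1) else pvDownF A N M n) = _
      rw [h1]
      simp only [Bool.false_eq_true, if_false]
      exact IH h (by omega) (fun k hk1 hk2 => hnone k hk1 (by omega))

-- ---- B side: the DP table measures solid squares ----
lemma rowGo_getD_ge (r : List Bool) (next : List Nat) (M : Nat) :
    ∀ jj t, jj ≤ t → (pvSqRowGo r next M jj).getD t 0 = 0 := by
  intro jj
  induction jj with
  | zero => intro t _; cases t <;> simp [pvSqRowGo]
  | succ jj IH =>
    intro t ht
    cases t with
    | zero => omega
    | succ t =>
      show (pvSqRowGo r next M jj).getD t 0 = 0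
      exact IH t (by omega)

lemma rowGo_headI (r : List Bool) (next : List Nat) (M : Nat) (jj : Nat) :
    (pvSqRowGo r next M jj).headI = (pvSqRowGo r next M jj).getD 0 0 := by
  cases jj <;> simp [pvSqRowGo]

lemma rowGo_getD_lt (r : List Bool) (next : List Nat) (M : Nat) :
    ∀ jj, jj ≤ M → ∀ t, t < jj →
      (pvSqRowGo r next M jj).getD t 0 =
        if r.getD (M - jj + t) false then
          1 + pvMin3 (next.getD (M - jj + t) 0) ((pvSqRowGo r next M jj).getD (t+1) 0)
            (next.getD (M - jj + t + 1) 0)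
        else 0 := by
  intro jj
  induction jj with
  | zero => intro _ t ht; omega
  | succ jj IH =>
    intro hM t ht
    cases t with
    | zero =>
      show (pvSqRowGo r next M (jj+1)).getD 0 0 = _
      have h1 : (pvSqRowGo r next M (jj+1)).getD 0 0 =
          if r.getD (M - (jj+1)) false then
            1 + pvMin3 (next.getD (M - (jj+1)) 0) ((pvSqRowGo r next M jj).headI)
              (next.getD (M - (jj+1) + 1) 0)
          else 0 := by
        simp [pvSqRowGo]
      have h2 : (pvSqRowGo r next M (jj+1)).getD 1 0 = (pvSqRowGo r next M jj).getD 0 0 := by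
        simp [pvSqRowGo]
      rw [h1, h2, rowGo_headI]
      simp
    | succ t =>
      have h2 : (pvSqRowGo r next M (jj+1)).getD (t+1) 0 = (pvSqRowGo r next M jj).getD t 0 := by
        simp [pvSqRowGo]
      have h3 : (pvSqRowGo r next M (jj+1)).getD (t+1+1) 0 = (pvSqRowGo r next M jj).getD (t+1) 0 := by
        simp [pvSqRowGo]
      rw [h2, h3, IH (by omega) t (by omega)]
      have e : M - jj + t = M - (jj+1) + (t+1) := by omega
      rw [e]

lemma sqGrid_ne_nil (M : Nat) (L : List (List Bool)) : pvSqGrid M L ≠ [] := by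
  cases L <;> simp [pvSqGrid]

lemma sqGrid_headI (M : Nat) (L : List (List Bool)) :
    (pvSqGrid M L).headI = (pvSqGrid M L).getD 0 [] := by
  cases hL : pvSqGrid M L with
  | nil => exact absurd hL (sqGrid_ne_nil M L)
  | cons x xs => simp

lemma sqGet_zero (M : Nat) (L : List (List Bool)) :
    ∀ i j, (L.length ≤ i ∨ M ≤ j) → pvSqGet (pvSqGrid M L) i j = 0 := by
  induction L with
  | nil =>
    intro i j _
    cases i with
    | zero =>
      simp only [pvSqGet, pvSqGrid, List.getD_cons_zero]
      rw [List.getD_eq_getElem?_getD, List.getElem?_replicate]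
      split <;> simp
    | succ i => simp [pvSqGet, pvSqGrid, List.getD]
  | cons r rs IH =>
    intro i j h
    cases i with
    | zero =>
      have hj : M ≤ j := by
        rcases h with h | h
        · simp at h
        · exact h
      show (pvSqRowGo r (pvSqGrid M rs).headI M M).getD j 0 = 0
      exact rowGo_getD_ge _ _ _ M j hj
    | succ i =>
      show pvSqGet (pvSqGrid M rs) i j = 0
      refine IH i j ?_
      rcases h with h | h
      · left; simpa using h
      · right; exact h

lemma sqGet_rec (M : Nat) (L : List (List Bool)) :
    ∀ i j, i < L.length → j < M →
    pvSqGet (pvSqGrid M L) i j =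
      if pvGget L i j then
        1 + pvMin3 (pvSqGet (pvSqGrid M L) (i+1) j) (pvSqGet (pvSqGrid M L) i (j+1))
          (pvSqGet (pvSqGrid M L) (i+1) (j+1))
      else 0 := by
  induction L with
  | nil => intro i j hi _; simp at hi
  | cons r rs IH =>
    intro i j hi hj
    cases i with
    | zero =>
      have h1 : pvSqGet (pvSqGrid M (r :: rs)) 0 j =
          (pvSqRowGo r (pvSqGrid M rs).headI M M).getD j 0 := rfl
      rw [h1, rowGo_getD_lt r _ M M (le_refl M) j hj]
      have e : M - M + j = j := by omega
      rw [e]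
      have e2 : pvGget (r :: rs) 0 j = r.getD j false := by simp [pvGget]
      have e3 : ∀ y, (pvSqGrid M rs).headI.getD y 0 = pvSqGet (pvSqGrid M (r :: rs)) 1 y := by
        intro y
        show _ = pvSqGet (pvSqGrid M rs) 0 y
        rw [sqGrid_headI]
        rfl
      rw [e2, e3 j, e3 (j+1)]
      rfl
    | succ i =>
      have h1 : ∀ a y, pvSqGet (pvSqGrid M (r :: rs)) (a+1) y = pvSqGet (pvSqGrid M rs) a y :=
        fun a y => rfl
      have h2 : pvGget (r :: rs) (i+1) j = pvGget rs i j := by simp [pvGget]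
      rw [h1, h2, h1, h1, h1, IH i j (by simpa using hi) hj]

lemma sq_iff_solid (M : Nat) (L : List (List Bool)) :
    ∀ k i j, 1 ≤ k → (k ≤ pvSqGet (pvSqGrid M L) i j ↔ pvSolid L L.length M i j k = true) := by
  intro k
  induction k with
  | zero => intro i j h; omega
  | succ k IHk =>
    intro i j _
    by_cases hin : i < L.length ∧ j < M
    · rw [sqGet_rec M L i j hin.1 hin.2]
      cases hgg : pvGget L i j with
      | false =>
        simp only [Bool.false_eq_true, if_false]
        rw [solid_split]
        simp [hgg]
      | true =>
        simp only [if_true]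
        rw [solid_split]
        by_cases hk0 : k = 0
        · subst hk0
          simp only [hgg, Bool.true_and]
          constructor
          · intro _
            have hb : ∀ a b, a ≤ L.length → b ≤ M → pvSolid L L.length M a b 0 = true := by
              intro a b ha hb
              rw [solid_iff]
              exact ⟨by omega, by omega, by omega⟩
            rw [hb (i+1) j (by omega) (by omega), hb i (j+1) (by omega) (by omega),
              hb (i+1) (j+1) (by omega) (by omega)]
            rfl
          · intro _; omega
        · have hk1 : 1 ≤ k := by omega
          rw [Bool.and_eq_true, Bool.and_eq_true, Bool.and_eq_true]
          rw [← IHk (i+1) j hk1, ← IHk i (j+1) hk1, ← IHk (i+1) (j+1) hk1]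
          simp only [hgg, true_and]
          simp only [pvMin3]
          omega
    · have hz : pvSqGet (pvSqGrid M L) i j = 0 := sqGet_zero M L i j (by omega)
      rw [hz]
      constructor
      · intro h; omega
      · intro h
        rw [solid_iff] at h
        omega

lemma check_eq (A : List (List Bool)) (M k : Nat) (hk : 1 ≤ k)
    (hN : 2*k ≤ A.length) (hM : 2*k ≤ M) :
    pvCheck (pvSqGrid M A) A.length M k = pvEL A A.length M k := by
  rw [Bool.eq_iff_iff]
  simp only [pvCheck, pvEL, List.any_eq_true, List.mem_range, Bool.and_eq_true,
    decide_eq_true_eq]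
  constructor
  · rintro ⟨i, hi, j, hj, ⟨h1, h2⟩, h3⟩
    rw [sq_iff_solid M A k i j hk] at h1
    rw [sq_iff_solid M A k (i+k) j hk] at h2
    rw [sq_iff_solid M A k (i+k) (j+k) hk] at h3
    exact ⟨i, by omega, j, by omega, ⟨⟨⟨by omega, by omega⟩, h1⟩, h2⟩, h3⟩
  · rintro ⟨i, hi, j, hj, ⟨⟨⟨h1, h2⟩, h3⟩, h4⟩, h5⟩
    rw [← sq_iff_solid M A k i j hk] at h3
    rw [← sq_iff_solid M A k (i+k) j hk] at h4
    rw [← sq_iff_solid M A k (i+k) (j+k) hk] at h5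
    exact ⟨i, by omega, j, by omega, ⟨h3, h4⟩, h5⟩

lemma scan_eq (A : List (List Bool)) (M : Nat) :
    ∀ n, 2*n ≤ A.length → 2*n ≤ M →
      pvScanK (pvSqGrid M A) A.length M n = pvDownF A A.length M n := by
  intro n
  induction n with
  | zero => intro _ _; rfl
  | succ n IH =>
    intro hN hM
    show (if pvCheck (pvSqGrid M A) A.length M (n+1) then ((n : Int)+1)
          else pvScanK (pvSqGrid M A) A.length M n) = _
    rw [check_eq A M (n+1) (by omega) hN hM, IH (by omega) (by omega)]
    rfl

-- ===== VERDICT (by name: the statement is the Claim_ definition above) =====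
theorem solution_spec : Claim_equal_solution := by
  intro A _ hPre
  obtain ⟨hne, hrows⟩ := hPre
  unfold Spec_solution solution solution_alt
  have hWF : pvWF A A.length (A.headI).length := by
    refine ⟨rfl, ?_⟩
    intro a ha
    have hmem : A.getD a [] ∈ A := by
      rw [List.getD_eq_getElem?_getD, List.getElem?_eq_getElem ha]
      exact List.getElem_mem ha
    exact hrows _ hmem
  have hinit : ∀ a b, a < A.length → b < (A.headI).length →
      pvGget A a b = pvSolid A A.length (A.headI).length a b 1 := by
    intro a b ha hb
    rw [Bool.eq_iff_iff, solid_iff]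
    constructor
    · intro hg
      refine ⟨by omega, by omega, ?_⟩
      intro di hdi dj hdj
      have e1 : di = 0 := by omega
      have e2 : dj = 0 := by omega
      subst e1; subst e2; simpa using hg
    · rintro ⟨_, _, hc⟩
      simpa using hc 0 (by omega) 0 (by omega)
  rw [loopA_eq A A.length (A.headI).length A.length A (A.headI).length 1 0 hWF
    (by omega) (by omega) (by omega) hinit]
  rw [bestFrom_eq_downSeg, downSeg_eq_downF]
  have htr : pvDownF A A.length (A.headI).length (min A.length (A.headI).length) =
      pvDownF A A.length (A.headI).length (min A.length (A.headI).length / 2) := by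
    refine downF_trunc A A.length (A.headI).length _ _ (by omega) ?_
    intro k hk1 hk2
    cases hel : pvEL A A.length (A.headI).length k with
    | false => rfl
    | true =>
      have := eL_bound A A.length (A.headI).length k hel
      omega
  rw [htr, ← scan_eq A (A.headI).length (min A.length (A.headI).length / 2)
    (by omega) (by omega)]
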